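-- pv_equiv track=rewrite | github.com/JLowe-N/Algorithms | AlgoExpert/checkbstequality.py | bstEqualityHelper
-- ===== SOURCE A (Python) =====
-- def bstEqualityHelper(arrayOne, arrayTwo, rootIdxOne, rootIdxTwo, minVal, maxVal):
--     if rootIdxOne == -1 or rootIdxTwo == -1:
--         return rootIdxOne == rootIdxTwo
--     if arrayOne[rootIdxOne] != arrayTwo[rootIdxTwo]:
--         return False
--
--     leftRootIdxOne = getIdxOfFirstSmaller(arrayOne, rootIdxOne, minVal)
--     leftRootIdxTwo = getIdxOfFirstSmaller(arrayTwo, rootIdxTwo, minVal)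
--     rightRootIdxOne = getIdxOfFirstBiggerOrEqual(arrayOne, rootIdxOne, maxVal)
--     rightRootIdxTwo = getIdxOfFirstBiggerOrEqual(arrayTwo, rootIdxTwo, maxVal)
--
--     parentNodeValue = arrayOne[rootIdxOne]
--     leftAreSame = bstEqualityHelper(arrayOne, arrayTwo, leftRootIdxOne, leftRootIdxTwo, minVal, parentNodeValue)
--     rightAreSame =  bstEqualityHelper(arrayOne, arrayTwo, rightRootIdxOne, rightRootIdxTwo, parentNodeValue, maxVal)
--
--     return leftAreSame and rightAreSame
--
-- def getIdxOfFirstSmaller(array, startingIdx, minVal):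
--     for i in range(startingIdx + 1, len(array)):
--         if array[i] < array[startingIdx] and array[i] >= minVal:
--             return i
--     return -1
--
-- def getIdxOfFirstBiggerOrEqual(array, startingIdx, maxVal):
--     for i in range(startingIdx + 1, len(array)):
--         if array[i] >= array[startingIdx] and array[i] <= maxVal:
--             return i
--     return -1
-- ===== SOURCE B (Python) =====
-- def bstEqualityHelper(arrayOne, arrayTwo, rootIdxOne, rootIdxTwo, minVal, maxVal):
--     # Iterative version: explicit stack of (idxOne, idxTwo, minVal, maxVal) frames.
--     stack = [(rootIdxOne, rootIdxTwo, minVal, maxVal)]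
--     while stack:
--         i1, i2, lo, hi = stack.pop()
--         if i1 == -1 or i2 == -1:
--             if i1 != i2:
--                 return False
--             continue
--         v = arrayOne[i1]
--         if v != arrayTwo[i2]:
--             return False
--         stack.append((getIdxOfFirstBiggerOrEqual(arrayOne, i1, hi),
--                       getIdxOfFirstBiggerOrEqual(arrayTwo, i2, hi), v, hi))
--         stack.append((getIdxOfFirstSmaller(arrayOne, i1, lo),
--                       getIdxOfFirstSmaller(arrayTwo, i2, lo), lo, v))
--     return True
--
-- def getIdxOfFirstSmaller(array, startingIdx, minVal):
--     for i in range(startingIdx + 1, len(array)):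
--         if array[i] < array[startingIdx] and array[i] >= minVal:
--             return i
--     return -1
--
-- def getIdxOfFirstBiggerOrEqual(array, startingIdx, maxVal):
--     for i in range(startingIdx + 1, len(array)):
--         if array[i] >= array[startingIdx] and array[i] <= maxVal:
--             return i
--     return -1
-- ===== Notes on version B (the rewrite author's own statement) =====
-- stated objective: alternative
-- what changed: Replaces A's double recursion by a single while-loop over an explicit stack of (idxOne, idxTwo, minVal, maxVal) frames, popping one frame per iteration and pushing the two child frames; the index-scan helpers are kept.
import Mathlib
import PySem

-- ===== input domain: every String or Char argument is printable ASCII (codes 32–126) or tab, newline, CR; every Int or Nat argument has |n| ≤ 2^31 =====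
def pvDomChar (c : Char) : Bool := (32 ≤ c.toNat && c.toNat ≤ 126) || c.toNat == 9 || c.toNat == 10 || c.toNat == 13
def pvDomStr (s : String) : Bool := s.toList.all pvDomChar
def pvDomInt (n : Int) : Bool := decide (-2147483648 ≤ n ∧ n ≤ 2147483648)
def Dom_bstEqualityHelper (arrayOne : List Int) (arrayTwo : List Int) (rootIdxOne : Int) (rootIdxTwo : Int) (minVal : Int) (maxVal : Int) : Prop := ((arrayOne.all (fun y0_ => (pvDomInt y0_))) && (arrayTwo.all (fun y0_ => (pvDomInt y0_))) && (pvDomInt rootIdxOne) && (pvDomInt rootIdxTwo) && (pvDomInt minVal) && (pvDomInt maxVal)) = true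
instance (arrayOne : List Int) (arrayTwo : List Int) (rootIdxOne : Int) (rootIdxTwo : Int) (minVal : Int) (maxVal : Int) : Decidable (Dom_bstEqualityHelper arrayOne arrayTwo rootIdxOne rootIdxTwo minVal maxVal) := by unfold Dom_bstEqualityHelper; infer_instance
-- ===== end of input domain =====

-- B replaces A's double recursion by a single while-loop over an explicit stack of
-- (idxOne, idxTwo, minVal, maxVal) frames (objective: alternative decomposition, same cost).

-- ===== PORT A =====
-- shared helper getIdxOfFirstSmaller: the for-loop over range(startingIdx+1, len(array)).
-- pyGetD is exact here: every index the loop reads lies in [startingIdx+1, len) ⊆ range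
-- whenever startingIdx itself is a valid (possibly negative) Python index, which the
-- callers below guarantee (they index array[startingIdx] first).
def scanSmaller (array : List Int) (startingIdx minVal : Int) : List Int → Int
  | [] => -1
  | i :: rest =>
    if PySem.List.pyGetD array i 0 < PySem.List.pyGetD array startingIdx 0 ∧
       minVal ≤ PySem.List.pyGetD array i 0
    then i else scanSmaller array startingIdx minVal rest

def getIdxOfFirstSmaller (array : List Int) (startingIdx minVal : Int) : Int :=
  scanSmaller array startingIdx minVal
    (PySem.List.pyRange (startingIdx + 1) (array.length : Int) 1)

-- shared helper getIdxOfFirstBiggerOrEqual (same loop, other condition)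
def scanBigger (array : List Int) (startingIdx maxVal : Int) : List Int → Int
  | [] => -1
  | i :: rest =>
    if PySem.List.pyGetD array startingIdx 0 ≤ PySem.List.pyGetD array i 0 ∧
       PySem.List.pyGetD array i 0 ≤ maxVal
    then i else scanBigger array startingIdx maxVal rest

def getIdxOfFirstBiggerOrEqual (array : List Int) (startingIdx maxVal : Int) : Int :=
  scanBigger array startingIdx maxVal
    (PySem.List.pyRange (startingIdx + 1) (array.length : Int) 1)

-- termination gauge: a child index returned by a scan is -1 or strictly larger than its
-- parent (and < length), so this strictly decreases along A's recursion
def pvGauge (n i : Int) : Nat := if i = -1 then 0 else (n - i).toNat + 1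

theorem pvInRange_of_pyGet?_some {α : Type} {xs : List α} {i : Int} {v : α}
    (h : PySem.List.pyGet? xs i = some v) : -(xs.length : Int) ≤ i ∧ i < (xs.length : Int) := by
  by_contra hc
  have : PySem.List.pyGet? xs i = none := by
    rw [PySem.List.pyGet?_eq_none_iff]
    simp [PySem.Raise.InRange]
    omega
  simp [this] at h

theorem scanSmaller_mem (array : List Int) (s lo : Int) (l : List Int) :
    scanSmaller array s lo l = -1 ∨ scanSmaller array s lo l ∈ l := by
  induction l with
  | nil => simp [scanSmaller]
  | cons i rest ih =>
    simp only [scanSmaller]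
    split
    · simp
    · rcases ih with h | h
      · exact Or.inl h
      · exact Or.inr (List.mem_cons_of_mem _ h)

theorem scanBigger_mem (array : List Int) (s hi : Int) (l : List Int) :
    scanBigger array s hi l = -1 ∨ scanBigger array s hi l ∈ l := by
  induction l with
  | nil => simp [scanBigger]
  | cons i rest ih =>
    simp only [scanBigger]
    split
    · simp
    · rcases ih with h | h
      · exact Or.inl h
      · exact Or.inr (List.mem_cons_of_mem _ h)

theorem pvGauge_smaller_lt (array : List Int) (i lo : Int) (hne : i ≠ -1)
    (hlt : i < (array.length : Int)) :
    pvGauge (array.length : Int) (getIdxOfFirstSmaller array i lo) < pvGauge (array.length : Int) i := by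
  rcases scanSmaller_mem array i lo (PySem.List.pyRange (i + 1) (array.length : Int) 1) with h | h <;>
    unfold getIdxOfFirstSmaller
  · rw [h]; simp [pvGauge, hne]
  · rw [PySem.List.mem_pyRange_one] at h
    simp only [pvGauge, hne, if_false]
    split <;> omega

theorem pvGauge_bigger_lt (array : List Int) (i hi : Int) (hne : i ≠ -1)
    (hlt : i < (array.length : Int)) :
    pvGauge (array.length : Int) (getIdxOfFirstBiggerOrEqual array i hi) < pvGauge (array.length : Int) i := by
  rcases scanBigger_mem array i hi (PySem.List.pyRange (i + 1) (array.length : Int) 1) with h | h <;>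
    unfold getIdxOfFirstBiggerOrEqual
  · rw [h]; simp [pvGauge, hne]
  · rw [PySem.List.mem_pyRange_one] at h
    simp only [pvGauge, hne, if_false]
    split <;> omega

-- packaged decrease facts, cited by name in decreasing_by (keeps the recursion bodies small)
theorem pvDecA_left (arrayOne arrayTwo : List Int) (rootIdxOne rootIdxTwo minVal : Int)
    {v1 v2 : Int} (hnb : ¬(rootIdxOne = -1 ∨ rootIdxTwo = -1))
    (h1 : PySem.List.pyGet? arrayOne rootIdxOne = some v1)
    (h2 : PySem.List.pyGet? arrayTwo rootIdxTwo = some v2) :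
    pvGauge (arrayOne.length : Int) (getIdxOfFirstSmaller arrayOne rootIdxOne minVal) +
      pvGauge (arrayTwo.length : Int) (getIdxOfFirstSmaller arrayTwo rootIdxTwo minVal) <
      pvGauge (arrayOne.length : Int) rootIdxOne + pvGauge (arrayTwo.length : Int) rootIdxTwo :=
  Nat.add_lt_add
    (pvGauge_smaller_lt _ _ _ (fun h => hnb (Or.inl h)) (pvInRange_of_pyGet?_some h1).2)
    (pvGauge_smaller_lt _ _ _ (fun h => hnb (Or.inr h)) (pvInRange_of_pyGet?_some h2).2)

theorem pvDecA_right (arrayOne arrayTwo : List Int) (rootIdxOne rootIdxTwo maxVal : Int)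
    {v1 v2 : Int} (hnb : ¬(rootIdxOne = -1 ∨ rootIdxTwo = -1))
    (h1 : PySem.List.pyGet? arrayOne rootIdxOne = some v1)
    (h2 : PySem.List.pyGet? arrayTwo rootIdxTwo = some v2) :
    pvGauge (arrayOne.length : Int) (getIdxOfFirstBiggerOrEqual arrayOne rootIdxOne maxVal) +
      pvGauge (arrayTwo.length : Int) (getIdxOfFirstBiggerOrEqual arrayTwo rootIdxTwo maxVal) <
      pvGauge (arrayOne.length : Int) rootIdxOne + pvGauge (arrayTwo.length : Int) rootIdxTwo :=
  Nat.add_lt_add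
    (pvGauge_bigger_lt _ _ _ (fun h => hnb (Or.inl h)) (pvInRange_of_pyGet?_some h1).2)
    (pvGauge_bigger_lt _ _ _ (fun h => hnb (Or.inr h)) (pvInRange_of_pyGet?_some h2).2)

def bstEqualityHelper (arrayOne : List Int) (arrayTwo : List Int) (rootIdxOne : Int) (rootIdxTwo : Int) (minVal : Int) (maxVal : Int) : Bool :=
  if rootIdxOne = -1 ∨ rootIdxTwo = -1 then rootIdxOne == rootIdxTwo
  else
    match h1 : PySem.List.pyGet? arrayOne rootIdxOne, h2 : PySem.List.pyGet? arrayTwo rootIdxTwo with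
    | some v1, some v2 =>
      if v1 ≠ v2 then false
      else
        let leftRootIdxOne := getIdxOfFirstSmaller arrayOne rootIdxOne minVal
        let leftRootIdxTwo := getIdxOfFirstSmaller arrayTwo rootIdxTwo minVal
        let rightRootIdxOne := getIdxOfFirstBiggerOrEqual arrayOne rootIdxOne maxVal
        let rightRootIdxTwo := getIdxOfFirstBiggerOrEqual arrayTwo rootIdxTwo maxVal
        let leftAreSame := bstEqualityHelper arrayOne arrayTwo leftRootIdxOne leftRootIdxTwo minVal v1
        let rightAreSame := bstEqualityHelper arrayOne arrayTwo rightRootIdxOne rightRootIdxTwo v1 maxVal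
        leftAreSame && rightAreSame
    | _, _ => false   -- Python raises IndexError here; excluded by Pre_
termination_by pvGauge (arrayOne.length : Int) rootIdxOne + pvGauge (arrayTwo.length : Int) rootIdxTwo
decreasing_by
  · exact pvDecA_left arrayOne arrayTwo rootIdxOne rootIdxTwo minVal (by assumption) h1 h2
  · exact pvDecA_right arrayOne arrayTwo rootIdxOne rootIdxTwo maxVal (by assumption) h1 h2

-- ===== PORT B =====
-- weight of a stack frame / of the whole stack: exponential so that the two child frames
-- pushed for one popped frame weigh strictly less than the frame itself
def pvFrameW (n1 n2 : Int) (f : Int × Int × Int × Int) : Nat :=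
  3 ^ (pvGauge n1 f.1 + pvGauge n2 f.2.1)

def pvStackW (n1 n2 : Int) (s : List (Int × Int × Int × Int)) : Nat :=
  (s.map (pvFrameW n1 n2)).sum

theorem pvPow3_add_lt {x y k : Nat} (hx : x < k) (hy : y < k) : 3 ^ x + 3 ^ y < 3 ^ k := by
  have h1 : 3 ^ x ≤ 3 ^ (k - 1) := Nat.pow_le_pow_right (by norm_num) (by omega)
  have h2 : 3 ^ y ≤ 3 ^ (k - 1) := Nat.pow_le_pow_right (by norm_num) (by omega)
  have h3 : 3 ^ (k - 1) * 3 = 3 ^ k := by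
    rw [← Nat.pow_succ]
    congr 1
    omega
  have h4 : 0 < 3 ^ (k - 1) := Nat.pow_pos (by norm_num)
  omega

-- packaged decrease facts for the loop
theorem pvDecB_pop (n1 n2 : Int) (f : Int × Int × Int × Int) (rest : List (Int × Int × Int × Int)) :
    pvStackW n1 n2 rest < pvStackW n1 n2 (f :: rest) :=
  Nat.lt_add_of_pos_left (Nat.pow_pos (by norm_num))

theorem pvDecB_push (arrayOne arrayTwo : List Int) (i1 i2 lo hi : Int)
    (rest : List (Int × Int × Int × Int)) {v w : Int} (hnb : ¬(i1 = -1 ∨ i2 = -1))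
    (h1 : PySem.List.pyGet? arrayOne i1 = some v)
    (h2 : PySem.List.pyGet? arrayTwo i2 = some w) :
    pvStackW (arrayOne.length : Int) (arrayTwo.length : Int)
      ((getIdxOfFirstSmaller arrayOne i1 lo, getIdxOfFirstSmaller arrayTwo i2 lo, lo, v) ::
       (getIdxOfFirstBiggerOrEqual arrayOne i1 hi, getIdxOfFirstBiggerOrEqual arrayTwo i2 hi, v, hi) :: rest) <
      pvStackW (arrayOne.length : Int) (arrayTwo.length : Int) ((i1, i2, lo, hi) :: rest) := by
  simp only [pvStackW, List.map_cons, List.sum_cons]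
  have hL := Nat.add_lt_add
    (pvGauge_smaller_lt arrayOne i1 lo (fun h => hnb (Or.inl h)) (pvInRange_of_pyGet?_some h1).2)
    (pvGauge_smaller_lt arrayTwo i2 lo (fun h => hnb (Or.inr h)) (pvInRange_of_pyGet?_some h2).2)
  have hR := Nat.add_lt_add
    (pvGauge_bigger_lt arrayOne i1 hi (fun h => hnb (Or.inl h)) (pvInRange_of_pyGet?_some h1).2)
    (pvGauge_bigger_lt arrayTwo i2 hi (fun h => hnb (Or.inr h)) (pvInRange_of_pyGet?_some h2).2)
  have := pvPow3_add_lt hL hR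
  simp only [pvFrameW] at *
  omega

-- the while loop of B: pop a frame, test it, push the two child frames
def bstLoop (arrayOne arrayTwo : List Int) (stack : List (Int × Int × Int × Int)) : Bool :=
  match stack with
  | [] => true
  | (i1, i2, lo, hi) :: rest =>
    if i1 = -1 ∨ i2 = -1 then
      if i1 ≠ i2 then false else bstLoop arrayOne arrayTwo rest
    else
      match h1 : PySem.List.pyGet? arrayOne i1 with
      | none => false   -- Python raises IndexError here; excluded by Pre_
      | some v =>
        match h2 : PySem.List.pyGet? arrayTwo i2 with
        | none => false   -- Python raises IndexError here; excluded by Pre_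
        | some w =>
          if v ≠ w then false
          else bstLoop arrayOne arrayTwo
            ((getIdxOfFirstSmaller arrayOne i1 lo, getIdxOfFirstSmaller arrayTwo i2 lo, lo, v) ::
             (getIdxOfFirstBiggerOrEqual arrayOne i1 hi, getIdxOfFirstBiggerOrEqual arrayTwo i2 hi, v, hi) :: rest)
termination_by pvStackW (arrayOne.length : Int) (arrayTwo.length : Int) stack
decreasing_by
  · exact pvDecB_pop _ _ _ rest
  · exact pvDecB_push arrayOne arrayTwo i1 i2 lo hi rest (by assumption) h1 h2

def bstEqualityHelper_alt (arrayOne : List Int) (arrayTwo : List Int) (rootIdxOne : Int) (rootIdxTwo : Int) (minVal : Int) (maxVal : Int) : Bool :=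
  bstLoop arrayOne arrayTwo [(rootIdxOne, rootIdxTwo, minVal, maxVal)]

-- ===== PRECONDITION & SPEC =====
-- Pre_ = exactly the inputs where Python A returns (both Pythons raise IndexError on the
-- same inputs: a non -1 root index outside [-len, len) that is actually dereferenced).
def Pre_bstEqualityHelper (arrayOne : List Int) (arrayTwo : List Int) (rootIdxOne : Int) (rootIdxTwo : Int) (minVal : Int) (maxVal : Int) : Prop :=
  rootIdxOne = -1 ∨ rootIdxTwo = -1 ∨
    (PySem.Raise.InRange arrayOne.length rootIdxOne ∧ PySem.Raise.InRange arrayTwo.length rootIdxTwo)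
instance (arrayOne : List Int) (arrayTwo : List Int) (rootIdxOne : Int) (rootIdxTwo : Int) (minVal : Int) (maxVal : Int) : Decidable (Pre_bstEqualityHelper arrayOne arrayTwo rootIdxOne rootIdxTwo minVal maxVal) := by unfold Pre_bstEqualityHelper; infer_instance

def pvWitness_bstEqualityHelper : List Int × List Int × Int × Int × Int × Int :=
  ([10, 8, 5, 15, 2, 12, 11, 94, 81], [10, 15, 8, 12, 94, 81, 2, 5, 11], 0, 0, -2147483648, 2147483648)

def Spec_bstEqualityHelper (arrayOne : List Int) (arrayTwo : List Int) (rootIdxOne : Int) (rootIdxTwo : Int) (minVal : Int) (maxVal : Int) (out : Bool) : Prop := out = bstEqualityHelper_alt arrayOne arrayTwo rootIdxOne rootIdxTwo minVal maxVal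
instance (arrayOne : List Int) (arrayTwo : List Int) (rootIdxOne : Int) (rootIdxTwo : Int) (minVal : Int) (maxVal : Int) (out : Bool) : Decidable (Spec_bstEqualityHelper arrayOne arrayTwo rootIdxOne rootIdxTwo minVal maxVal out) := by unfold Spec_bstEqualityHelper; infer_instance

-- ===== CLAIM (what is proved, stated in full; the proofs are below) =====
def Claim_equal_bstEqualityHelper : Prop := ∀ (arrayOne : List Int) (arrayTwo : List Int) (rootIdxOne : Int) (rootIdxTwo : Int) (minVal : Int) (maxVal : Int), Dom_bstEqualityHelper arrayOne arrayTwo rootIdxOne rootIdxTwo minVal maxVal → Pre_bstEqualityHelper arrayOne arrayTwo rootIdxOne rootIdxTwo minVal maxVal → Spec_bstEqualityHelper arrayOne arrayTwo rootIdxOne rootIdxTwo minVal maxVal (bstEqualityHelper arrayOne arrayTwo rootIdxOne rootIdxTwo minVal maxVal)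

-- ===== LEMMAS AND PROOFS =====
theorem pvWitness_ok : Dom_bstEqualityHelper pvWitness_bstEqualityHelper.1 pvWitness_bstEqualityHelper.2.1 pvWitness_bstEqualityHelper.2.2.1 pvWitness_bstEqualityHelper.2.2.2.1 pvWitness_bstEqualityHelper.2.2.2.2.1 pvWitness_bstEqualityHelper.2.2.2.2.2 ∧ Pre_bstEqualityHelper pvWitness_bstEqualityHelper.1 pvWitness_bstEqualityHelper.2.1 pvWitness_bstEqualityHelper.2.2.1 pvWitness_bstEqualityHelper.2.2.2.1 pvWitness_bstEqualityHelper.2.2.2.2.1 pvWitness_bstEqualityHelper.2.2.2.2.2 := by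
  decide

-- the loop applied to any stack computes the conjunction of A over all frames
theorem bstLoop_eq_all (arrayOne arrayTwo : List Int) (stack : List (Int × Int × Int × Int)) :
    bstLoop arrayOne arrayTwo stack =
      stack.all (fun f => bstEqualityHelper arrayOne arrayTwo f.1 f.2.1 f.2.2.1 f.2.2.2) := by
  fun_induction bstLoop arrayOne arrayTwo stack with
  | case1 => simp
  | case2 i1 i2 lo hi rest hbase hne =>
    rw [List.all_cons, bstEqualityHelper.eq_def]
    simp [hbase, hne]
  | case3 i1 i2 lo hi rest hbase hne ih =>
    simp only [ne_eq, not_not] at hne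
    rw [ih, List.all_cons, bstEqualityHelper.eq_def, if_pos hbase]
    simp [hne]
  | case4 i1 i2 lo hi rest hbase h1 =>
    rw [List.all_cons, bstEqualityHelper.eq_def, if_neg hbase]
    split
    · simp_all
    · simp
  | case5 i1 i2 lo hi rest hbase v h1 h2 =>
    rw [List.all_cons, bstEqualityHelper.eq_def, if_neg hbase]
    split
    · simp_all
    · simp
  | case6 i1 i2 lo hi rest hbase v h1 w h2 hvw =>
    rw [List.all_cons, bstEqualityHelper.eq_def, if_neg hbase]
    split
    · simp_all
    · simp
  | case7 i1 i2 lo hi rest hbase v h1 w h2 hvw ih =>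
    simp only [ne_eq, not_not] at hvw
    rw [ih]
    simp only [List.all_cons]
    conv_rhs => rw [bstEqualityHelper.eq_def]
    rw [if_neg hbase]
    split
    · simp_all [Bool.and_assoc]
    · simp_all

-- ===== VERDICT (by name: the statement is the Claim_ definition above) =====
theorem bstEqualityHelper_spec : Claim_equal_bstEqualityHelper := by
  intro a1 a2 i1 i2 lo hi _ _
  unfold Spec_bstEqualityHelper bstEqualityHelper_alt
  rw [bstLoop_eq_all]
  simp
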